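-- pv_equiv track=rewrite | github.com/dunno-dev/msgD | server.py | parse
-- ===== SOURCE A (Python) =====
-- engtoru = {'q': 'й', 'w': 'ц', 'e': 'у', 'r': 'к', 't': 'е', 'y': 'н', 'u': 'г', 'i': 'ш', 'o': 'щ', 'p': 'з', '[': 'х', ']': 'ъ', 'a': 'ф', 's': 'ы', 'd': 'в', 'f': 'а', 'g': 'п', 'h': 'р', 'j': 'о', 'k': 'л', 'l': 'д', ';': 'ж', "'": 'э', 'z': 'я', 'x': 'ч', 'c': 'с', 'v': 'м', 'b': 'и', 'n': 'т', 'm': 'ь', ',': 'б', '.': 'ю'}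
--
-- def parse(escaped): # function to display cyrrilic correct
-- 	m = 0
-- 	cptext = list(escaped[1])
-- 	cyrIdx = []
-- 	tor = ""
-- 	for i in escaped[0].split("|")[1:]:
-- 		cyrIdx.append(int(i))
-- 	for i in cptext:
-- 		if m in cyrIdx:
-- 			if i in engtoru.keys():
-- 				cptext[m] = engtoru[i]
-- 			else:
-- 				cptext[m] = engtoru[i.lower()].upper()
-- 		else:
-- 			cptext[m] = i
-- 		m += 1
-- 	for i in cptext: tor += i
-- 	return tor
-- ===== SOURCE B (Python) =====
-- engtoru = {'q': 'й', 'w': 'ц', 'e': 'у', 'r': 'к', 't': 'е', 'y': 'н', 'u': 'г', 'i': 'ш', 'o': 'щ', 'p': 'з', '[': 'х', ']': 'ъ', 'a': 'ф', 's': 'ы', 'd': 'в', 'f': 'а', 'g': 'п', 'h': 'р', 'j': 'о', 'k': 'л', 'l': 'д', ';': 'ж', "'": 'э', 'z': 'я', 'x': 'ч', 'c': 'с', 'v': 'м', 'b': 'и', 'n': 'т', 'm': 'ь', ',': 'б', '.': 'ю'}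
--
-- def parse(escaped):
-- 	src = escaped[1]
-- 	cptext = list(src)
-- 	for tok in escaped[0].split("|")[1:]:
-- 		idx = int(tok)
-- 		if 0 <= idx < len(cptext):
-- 			c = src[idx]
-- 			cptext[idx] = engtoru[c] if c in engtoru else engtoru[c.lower()].upper()
-- 	return "".join(cptext)
-- ===== Notes on version B (the rewrite author's own statement) =====
-- stated objective: alternative
-- what changed: B loops only over the parsed flag indices and does targeted writes into the character list (reading each replacement from the original string), instead of A's scan of the whole string with a membership test of the position in the index list per character.
import Mathlib
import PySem

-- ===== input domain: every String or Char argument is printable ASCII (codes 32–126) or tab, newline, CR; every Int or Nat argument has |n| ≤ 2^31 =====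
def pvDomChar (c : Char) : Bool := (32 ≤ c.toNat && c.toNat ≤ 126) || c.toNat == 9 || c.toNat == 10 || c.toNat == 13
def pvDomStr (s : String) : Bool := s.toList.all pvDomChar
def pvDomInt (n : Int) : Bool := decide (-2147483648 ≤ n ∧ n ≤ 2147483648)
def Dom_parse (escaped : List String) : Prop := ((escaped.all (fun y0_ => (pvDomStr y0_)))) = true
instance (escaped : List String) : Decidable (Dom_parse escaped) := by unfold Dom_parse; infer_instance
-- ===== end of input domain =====

-- B loops only over the parsed flag indices and writes each remapped character directly
-- into the character list (reading it from the original string), instead of A's full scan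
-- with a per-position membership test in the index list ('alternative' objective).

-- ===== PORT A =====
-- shared module-level constant engtoru (both Pythons use the same dict literal)
def engtoruD : PySem.Dict Char Char := PySem.Dict.ofList
  [('q','й'),('w','ц'),('e','у'),('r','к'),('t','е'),('y','н'),('u','г'),('i','ш'),('o','щ'),('p','з'),
   ('[','х'),(']','ъ'),('a','ф'),('s','ы'),('d','в'),('f','а'),('g','п'),('h','р'),('j','о'),('k','л'),
   ('l','д'),(';','ж'),('\'','э'),('z','я'),('x','ч'),('c','с'),('v','м'),('b','и'),('n','т'),('m','ь'),
   (',','б'),('.','ю')]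

-- hand-port of str.upper() on one char: exact on Cyrillic lowercase 'а'..'я' (the only
-- reachable arguments here: the values of engtoru); identity elsewhere.
def ruUpper (c : Char) : Char :=
  if 'а' ≤ c ∧ c ≤ 'я' then Char.ofNat (c.toNat - 32) else c

-- the body of A's scanning loop, verbatim: state (m, cptext), iterated char i
def stepA (cyrIdx : List Int) (st : Nat × List Char) (i : Char) : Nat × List Char :=
  if ((st.1 : Int)) ∈ cyrIdx then
    if engtoruD.contains i then (st.1 + 1, st.2.set st.1 (engtoruD.getD i ' '))
    else (st.1 + 1, st.2.set st.1 (ruUpper (engtoruD.getD (PySem.Chars.lowerChar i) ' ')))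
  else (st.1 + 1, st.2.set st.1 i)

def parse (escaped : List String) : String :=
  -- m = 0; cptext = list(escaped[1]); cyrIdx = []; tor = ""
  let cptext : List Char := ((PySem.List.pyGet? escaped 1).getD "").toList
  -- for i in escaped[0].split("|")[1:]: cyrIdx.append(int(i))
  let cyrIdx : List Int :=
    (PySem.List.slice (((PySem.Str.split? ((PySem.List.pyGet? escaped 0).getD "") "|").getD [])) (some 1) none).foldl
      (fun acc i => acc ++ [(PySem.Int.ofStr? i).getD 0]) []
  -- for i in cptext: … ; m += 1   (the iterator reads each position before it is written)
  let res : Nat × List Char := cptext.foldl (stepA cyrIdx) (0, cptext)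
  -- for i in cptext: tor += i
  String.ofList (res.2.foldl (fun acc c => acc ++ [c]) [])

-- ===== PORT B =====
-- the body of B's loop over the flag tokens, verbatim: state cptext, iterated token
def stepB (src : List Char) (lst : List Char) (tok : String) : List Char :=
  if 0 ≤ (PySem.Int.ofStr? tok).getD 0 ∧ (PySem.Int.ofStr? tok).getD 0 < (lst.length : Int) then
    lst.set ((PySem.Int.ofStr? tok).getD 0).toNat
      (if engtoruD.contains (PySem.List.pyGetD src ((PySem.Int.ofStr? tok).getD 0) ' ') then
        engtoruD.getD (PySem.List.pyGetD src ((PySem.Int.ofStr? tok).getD 0) ' ') ' '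
       else ruUpper (engtoruD.getD (PySem.Chars.lowerChar (PySem.List.pyGetD src ((PySem.Int.ofStr? tok).getD 0) ' ')) ' '))
  else lst

def parse_alt (escaped : List String) : String :=
  -- src = escaped[1]; cptext = list(src)
  let src : List Char := ((PySem.List.pyGet? escaped 1).getD "").toList
  -- for tok in escaped[0].split("|")[1:]: … targeted write, guarded by 0 <= idx < len
  let toks : List String :=
    PySem.List.slice (((PySem.Str.split? ((PySem.List.pyGet? escaped 0).getD "") "|").getD [])) (some 1) none
  -- return "".join(cptext)
  String.ofList (toks.foldl (stepB src) src)

-- ===== PRECONDITION & SPEC =====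
-- Pre_ excludes exactly the inputs where Python A raises: fewer than two strings
-- (IndexError), a non-int token after the first '|' (ValueError), or a flagged in-range
-- character that maps neither directly nor via lower() (KeyError).
def Pre_parse (escaped : List String) : Prop :=
  2 ≤ escaped.length ∧
  (∀ t ∈ ((PySem.Str.split? (escaped.getD 0 "") "|").getD []).drop 1, (PySem.Int.ofStr? t).isSome) ∧
  (∀ p, p < (escaped.getD 1 "").toList.length →
    (p : Int) ∈ (((PySem.Str.split? (escaped.getD 0 "") "|").getD []).drop 1).map (fun t => (PySem.Int.ofStr? t).getD 0) →
    (engtoruD.contains ((escaped.getD 1 "").toList.getD p ' ') = true ∨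
     engtoruD.contains (PySem.Chars.lowerChar ((escaped.getD 1 "").toList.getD p ' ')) = true))

instance (escaped : List String) : Decidable (Pre_parse escaped) := by
  unfold Pre_parse; infer_instance

def pvWitness_parse : List String := ["|0|1|9", "qQ1z"]

def Spec_parse (escaped : List String) (out : String) : Prop := out = parse_alt escaped
instance (escaped : List String) (out : String) : Decidable (Spec_parse escaped out) := by unfold Spec_parse; infer_instance

-- ===== CLAIM (what is proved, stated in full; the proofs are below) =====
def Claim_equal_parse : Prop := ∀ (escaped : List String), Dom_parse escaped → Pre_parse escaped → Spec_parse escaped (parse escaped)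

-- ===== LEMMAS AND PROOFS =====

-- the character A writes at position m when the scan reaches it
def pvRemap (c : Char) : Char :=
  if engtoruD.contains c then engtoruD.getD c ' '
  else ruUpper (engtoruD.getD (PySem.Chars.lowerChar c) ' ')

def pvG (cyr : List Int) (m : Nat) (c : Char) : Char :=
  if (m : Int) ∈ cyr then pvRemap c else c

-- the final content, position by position, for positions starting at offset m
def pvMapFrom (cyr : List Int) : Nat → List Char → List Char
  | _, [] => []
  | m, c :: cs => pvG cyr m c :: pvMapFrom cyr (m + 1) cs

theorem pvMapFrom_getElem? (cyr : List Int) (cs : List Char) :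
    ∀ m p, (pvMapFrom cyr m cs)[p]? = cs[p]?.map (fun c => pvG cyr (m + p) c) := by
  induction cs with
  | nil => intro m p; simp [pvMapFrom]
  | cons c cs ih =>
    intro m p
    cases p with
    | zero => simp [pvMapFrom]
    | succ q => simpa [pvMapFrom, Nat.add_assoc, Nat.add_comm 1 q] using ih (m + 1) q

theorem pvStepA_eq (cyr : List Int) (st : Nat × List Char) (i : Char) :
    stepA cyr st i = (st.1 + 1, st.2.set st.1 (pvG cyr st.1 i)) := by
  unfold stepA pvG pvRemap; split_ifs <;> rfl

-- A's scanning fold computes pvMapFrom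
theorem pvFoldA (cyr : List Int) (cs : List Char) :
    ∀ (m : Nat) (lst : List Char), lst.length = m + cs.length →
    (cs.foldl (stepA cyr) (m, lst)).2 = lst.take m ++ pvMapFrom cyr m cs := by
  induction cs with
  | nil =>
    intro m lst h
    have hm : lst.length = m := by simpa using h
    simp [pvMapFrom, List.take_of_length_le hm.le]
  | cons c cs ih =>
    intro m lst h
    have hm : m < lst.length := by simp at h; omega
    have hlen : (lst.set m (pvG cyr m c)).length = (m + 1) + cs.length := by
      simp at h ⊢; omega
    have htake : (lst.set m (pvG cyr m c)).take (m + 1) = lst.take m ++ [pvG cyr m c] := by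
      apply List.ext_getElem?
      intro j
      rcases Nat.lt_trichotomy j m with hj | hj | hj
      · rw [List.getElem?_take_of_lt (by omega), List.getElem?_append_left (by simp; omega),
            List.getElem?_set_ne (by omega), List.getElem?_take_of_lt (by omega)]
      · subst hj
        rw [List.getElem?_take_of_lt (by omega), List.getElem?_set_self hm,
            List.getElem?_append_right (by simp)]
        simp [Nat.min_eq_left hm.le]
      · rw [List.getElem?_eq_none (by simp; omega), List.getElem?_eq_none (by simp; omega)]
    calc (List.foldl (stepA cyr) (m, lst) (c :: cs)).2
        = (List.foldl (stepA cyr) ((m + 1 : Nat), lst.set m (pvG cyr m c)) cs).2 := by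
          rw [List.foldl_cons, pvStepA_eq]
      _ = (lst.set m (pvG cyr m c)).take (m + 1) ++ pvMapFrom cyr (m + 1) cs := ih (m + 1) _ hlen
      _ = lst.take m ++ pvMapFrom cyr m (c :: cs) := by
          rw [htake, pvMapFrom, List.append_assoc]; rfl

-- B's targeted-write fold, position by position
theorem pvFoldB (src : List Char) (ts : List String) :
    ∀ (lst : List Char), lst.length = src.length →
    ∀ (p : Nat),
    (ts.foldl (stepB src) lst)[p]? =
    if (p : Int) ∈ ts.map (fun t => (PySem.Int.ofStr? t).getD 0) ∧ p < src.length then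
      src[p]?.map pvRemap
    else lst[p]? := by
  induction ts with
  | nil => intro lst hlen p; simp
  | cons t ts ih =>
    intro lst hlen p
    set idx : Int := (PySem.Int.ofStr? t).getD 0 with hidx
    rw [List.foldl_cons]
    by_cases hg : 0 ≤ idx ∧ idx < (lst.length : Int)
    · -- the first token writes at position idx.toNat
      have hstep : stepB src lst t =
          lst.set idx.toNat (pvRemap (PySem.List.pyGetD src idx ' ')) := by
        unfold stepB pvRemap
        rw [← hidx, if_pos hg]
      have hsetlen : (lst.set idx.toNat (pvRemap (PySem.List.pyGetD src idx ' '))).length = src.length := by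
        simp [hlen]
      rw [hstep, ih _ hsetlen p]
      by_cases hmem : (p : Int) ∈ ts.map (fun t => (PySem.Int.ofStr? t).getD 0) ∧ p < src.length
      · rw [if_pos hmem, if_pos ⟨List.mem_cons_of_mem _ hmem.1, hmem.2⟩]
      · rw [if_neg hmem]
        by_cases hp : idx.toNat = p
        · have hsl : idx < (src.length : Int) := by rw [← hlen]; exact hg.2
          have hple : p < src.length := by omega
          have hidxp : idx = (p : Int) := by omega
          have hmem' : (p : Int) ∈ (t :: ts).map (fun t => (PySem.Int.ofStr? t).getD 0) := by
            simp only [List.map_cons, List.mem_cons]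
            exact Or.inl (by rw [← hidx, hidxp])
          have hget : PySem.List.pyGetD src idx ' ' = src.getD p ' ' := by
            rw [hidxp, PySem.List.pyGetD_natCast]
          rw [hp, List.getElem?_set_self (by omega), if_pos ⟨hmem', hple⟩,
              List.getElem?_eq_getElem hple, hget]
          simp [List.getD, List.getElem?_eq_getElem hple]
        · rw [List.getElem?_set_ne hp]
          by_cases hc : (p : Int) ∈ (t :: ts).map (fun t => (PySem.Int.ofStr? t).getD 0) ∧ p < src.length
          · exfalso
            rcases hc with ⟨hc1, hc2⟩
            simp only [List.map_cons, List.mem_cons] at hc1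
            rcases hc1 with h1 | h1
            · exact hp (by rw [← hidx] at h1; omega)
            · exact hmem ⟨h1, hc2⟩
          · rw [if_neg hc]
    · have hstep : stepB src lst t = lst := by
        unfold stepB; rw [← hidx, if_neg hg]
      rw [hstep, ih _ hlen p]
      by_cases hc : (p : Int) ∈ (t :: ts).map (fun t => (PySem.Int.ofStr? t).getD 0) ∧ p < src.length
      · rcases hc with ⟨hc1, hc2⟩
        simp only [List.map_cons, List.mem_cons] at hc1
        rcases hc1 with h1 | h1
        · exfalso
          apply hg
          rw [← hidx] at h1
          constructor
          · omega
          · rw [hlen]; exact_mod_cast h1 ▸ (by exact_mod_cast hc2 : (p : Int) < (src.length : Int))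
        · rw [if_pos ⟨h1, hc2⟩, if_pos ⟨List.mem_cons_of_mem _ h1, hc2⟩]
      · rw [if_neg hc]
        by_cases hm2 : (p : Int) ∈ ts.map (fun t => (PySem.Int.ofStr? t).getD 0) ∧ p < src.length
        · exact absurd ⟨List.mem_cons_of_mem _ hm2.1, hm2.2⟩ hc
        · rw [if_neg hm2]

set_option maxHeartbeats 1000000 in
theorem pvMain (escaped : List String) : parse escaped = parse_alt escaped := by
  simp only [parse, parse_alt]
  set src : List Char := ((PySem.List.pyGet? escaped 1).getD "").toList with hsrc
  set toks : List String :=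
    PySem.List.slice (((PySem.Str.split? ((PySem.List.pyGet? escaped 0).getD "") "|").getD [])) (some 1) none with htoks
  set cyr : List Int := toks.foldl (fun acc i => acc ++ [(PySem.Int.ofStr? i).getD 0]) [] with hcyr
  have hcyr' : cyr = toks.map (fun t => (PySem.Int.ofStr? t).getD 0) := by
    rw [hcyr]
    suffices h : ∀ (l : List String) (acc : List Int),
        l.foldl (fun acc i => acc ++ [(PySem.Int.ofStr? i).getD 0]) acc
          = acc ++ l.map (fun t => (PySem.Int.ofStr? t).getD 0) by
      simpa using h toks []
    intro l
    induction l with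
    | nil => intro acc; simp
    | cons x xs ih => intro acc; simp [ih]
  have hA : (src.foldl (stepA cyr) (0, src)).2 = pvMapFrom cyr 0 src := by
    simpa using pvFoldA cyr src 0 src (by simp)
  apply congrArg String.ofList
  have htor : ∀ (l : List Char) (acc : List Char),
      l.foldl (fun acc c => acc ++ [c]) acc = acc ++ l := by
    intro l
    induction l with
    | nil => intro acc; simp
    | cons x xs ih => intro acc; simp [ih]
  rw [hA, htor, List.nil_append]
  apply List.ext_getElem?
  intro p
  rw [pvMapFrom_getElem?, pvFoldB src toks src rfl p, ← hcyr']
  by_cases hlt : p < src.length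
  · rw [List.getElem?_eq_getElem hlt]
    by_cases hmem : (p : Int) ∈ cyr
    · rw [if_pos ⟨hmem, hlt⟩]
      simp [pvG, hmem]
    · rw [if_neg (by tauto)]
      simp [pvG, hmem]
  · have : src[p]? = none := List.getElem?_eq_none (by omega)
    rw [this]
    simp [hlt]

-- ===== VERDICT (by name: the statement is the Claim_ definition above) =====
set_option maxHeartbeats 1000000 in
theorem parse_spec : Claim_equal_parse := by
  intro escaped _ _
  unfold Spec_parse
  exact pvMain escaped
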